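-- pv_equiv track=rewrite | github.com/hyungwoo822/code_test | greedy-test.py | solution
-- ===== SOURCE A (Python) =====
-- import heapq
-- import heapq
--
-- def solution(food_times, k):
--     if sum(food_times) <= k:
--         return -1
--     q = []
--     for i in range(len(food_times)):
--         heapq.heappush(q, (food_times[i], i+1))
--     length = len(food_times)
--     previous = 0
--     sum_value = 0
--     while q:
--         now = q[0][0]
--         spend = (now-previous) * length
--         if sum_value + spend > k :
--             break
--         heapq.heappop(q)
--         sum_value += spend
--         length -= 1
--         previous = now
--
--     result = sorted(q, key=lambda x:x[1])
--     return result[(k-sum_value) % length][1]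
-- ===== SOURCE B (Python) =====
-- def solution(food_times, k):
--     if sum(food_times) <= k:
--         return -1
--     counts = {}
--     for ft in food_times:
--         counts[ft] = counts.get(ft, 0) + 1
--     n = len(food_times)
--     prev = 0
--     eaten = 0
--     removed = 0
--     for t in sorted(counts):
--         remain = n - removed
--         need = (t - prev) * remain
--         if eaten + need > k:
--             alive = [i + 1 for i, ft in enumerate(food_times) if ft >= t]
--             return alive[(k - eaten) % remain]
--         eaten += need
--         removed += counts[t]
--         prev = t
-- ===== Notes on version B (the rewrite author's own statement) =====
-- stated objective: alternative
-- what changed: Replaces the heap of (time,index) pairs, the per-element pop loop and the final sort of the surviving pairs by a pairless formulation: a counting dict built in one pass, one batch scan over the sorted distinct time values, and the answer read off by filtering the original list for indices whose time is at least the break-point time.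
import Mathlib
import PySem

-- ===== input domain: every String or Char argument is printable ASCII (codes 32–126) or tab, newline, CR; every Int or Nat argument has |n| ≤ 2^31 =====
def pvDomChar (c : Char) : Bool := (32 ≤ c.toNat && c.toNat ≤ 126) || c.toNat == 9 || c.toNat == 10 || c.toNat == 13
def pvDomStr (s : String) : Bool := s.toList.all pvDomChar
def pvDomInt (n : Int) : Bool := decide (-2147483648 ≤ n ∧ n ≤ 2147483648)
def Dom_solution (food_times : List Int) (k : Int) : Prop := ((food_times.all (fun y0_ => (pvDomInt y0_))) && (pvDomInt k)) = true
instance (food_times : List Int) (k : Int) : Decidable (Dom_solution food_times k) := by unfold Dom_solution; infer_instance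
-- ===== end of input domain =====

-- B replaces A's heap of (time,index) pairs and per-element pop loop by a pairless batch scan over
-- the sorted distinct time values, reading the answer off the original list by a threshold filter
-- (objective: alternative — same asymptotic cost, no heap and no second sort).

-- ===== PORT A =====
-- heapq.heappush modelled on its observable behaviour in A: the queue is kept in ascending tuple
-- (lexicographic) order, so q[0] is the heap minimum and pops come out in ascending tuple order;
-- the final sorted(q, key=lambda x: x[1]) only depends on the queue's contents (indices distinct).
def heappushA (q : List (Int × Int)) (x : Int × Int) : List (Int × Int) :=
  match q with
  | [] => [x]
  | y :: ys =>
    if x.1 < y.1 ∨ (x.1 = y.1 ∧ x.2 ≤ y.2) then x :: y :: ys else y :: heappushA ys x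

-- the while-loop of A; returns (q, length, sum_value) at break / loop exit
def solutionLoop (k : Int) : List (Int × Int) → Int → Int → Int → List (Int × Int) × Int × Int
  | [], length, _, sum_value => ([], length, sum_value)
  | (now, i) :: rest, length, previous, sum_value =>
    let spend := (now - previous) * length
    if sum_value + spend > k then ((now, i) :: rest, length, sum_value)
    else solutionLoop k rest (length - 1) now (sum_value + spend)

def solution (food_times : List Int) (k : Int) : Int :=
  if food_times.sum ≤ k then -1
  else
    let q := (PySem.List.pyRange 0 (food_times.length : Int) 1).foldl
      (fun q i => heappushA q (PySem.List.pyGetD food_times i 0, i + 1)) []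
    let r := solutionLoop k q (food_times.length : Int) 0 0
    let result := PySem.List.sorted r.1 (fun x => x.2) false
    ((PySem.List.pyGet? result (PySem.Int.mod (k - r.2.2) r.2.1)).map (fun x => x.2)).getD 0

-- ===== PORT B =====
-- the for-loop of Source B over the sorted distinct times (state: prev, eaten, removed);
-- the [] arm is Python falling off the loop (returns no int there; that input is outside Pre_)
def solutionAltLoop (food_times : List Int) (k : Int) (n : Int) (counts : PySem.Dict Int Int) :
    List Int → Int → Int → Int → Int
  | [], _, _, _ => 0
  | t :: rest, prev, eaten, removed =>
    let remain := n - removed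
    let need := (t - prev) * remain
    if eaten + need > k then
      let alive := ((PySem.List.enumerate food_times).filter (fun p => t ≤ p.2)).map
        (fun p => p.1 + 1)
      (PySem.List.pyGet? alive (PySem.Int.mod (k - eaten) remain)).getD 0
    else
      solutionAltLoop food_times k n counts rest t (eaten + need) (removed + counts.getD t 0)

def solution_alt (food_times : List Int) (k : Int) : Int :=
  if food_times.sum ≤ k then -1
  else
    -- counts[ft] = counts.get(ft, 0) + 1 loop, then 'for t in sorted(counts)'
    let counts := food_times.foldl (fun d x => d.insert x (d.getD x 0 + 1)) PySem.Dict.empty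
    solutionAltLoop food_times k (food_times.length : Int) counts
      (PySem.List.sorted counts.keys (fun x => x) false) 0 0 0

-- ===== PRECONDITION & SPEC =====
-- Pre_ excludes only (food_times = [], k < 0): there A raises ZeroDivisionError
-- (sum([]) = 0 > k, the loop never runs, length = 0) and B returns no int (falls off its loop).
def Pre_solution (food_times : List Int) (k : Int) : Prop := food_times ≠ [] ∨ 0 ≤ k
instance (food_times : List Int) (k : Int) : Decidable (Pre_solution food_times k) := by
  unfold Pre_solution; infer_instance

def pvWitness_solution : List Int × Int := ([3, 1, 2], 5)

def Spec_solution (food_times : List Int) (k : Int) (out : Int) : Prop := out = solution_alt food_times k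
instance (food_times : List Int) (k : Int) (out : Int) : Decidable (Spec_solution food_times k out) := by unfold Spec_solution; infer_instance

-- ===== CLAIM (what is proved, stated in full; the proofs are below) =====
def Claim_equal_solution : Prop := ∀ (food_times : List Int) (k : Int), Dom_solution food_times k → Pre_solution food_times k → Spec_solution food_times k (solution food_times k)

-- ===== LEMMAS AND PROOFS =====

-- strict lexicographic order on the heap's (time, index) tuples
def lexLt (a b : Int × Int) : Prop := a.1 < b.1 ∨ (a.1 = b.1 ∧ a.2 < b.2)

-- the (time, original index + 1) pairs A pushes, in original order
def pairsOf (fts : List Int) : List (Int × Int) :=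
  (PySem.List.enumerate fts 0).map (fun p => (p.2, p.1 + 1))

-- what A computes from the loop's exit state (q, length, sum_value)
def aFinish (k : Int) (r : List (Int × Int) × Int × Int) : Int :=
  ((PySem.List.pyGet? (PySem.List.sorted r.1 (fun x => x.2) false)
      (PySem.Int.mod (k - r.2.2) r.2.1)).map (fun x => x.2)).getD 0

lemma solution_eq_aFinish (fts : List Int) (k : Int) (h : ¬ fts.sum ≤ k) :
    solution fts k = aFinish k (solutionLoop k
      ((PySem.List.pyRange 0 (fts.length : Int) 1).foldl
        (fun q i => heappushA q (PySem.List.pyGetD fts i 0, i + 1)) [])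
      (fts.length : Int) 0 0) := by
  simp [solution, aFinish, h]

lemma lexLt_trans {a b c : Int × Int} (h1 : lexLt a b) (h2 : lexLt b c) : lexLt a c := by
  unfold lexLt at *; omega

lemma map_fst_pairsOf (fts : List Int) : (pairsOf fts).map (fun p => p.1) = fts := by
  simp [pairsOf, List.map_map, Function.comp_def, PySem.List.map_snd_enumerate]

lemma snd_nodup_pairsOf (fts : List Int) : ((pairsOf fts).map (fun p => p.2)).Nodup := by
  have h : ((pairsOf fts).map (fun p => p.2)) = ((PySem.List.enumerate fts 0).map (fun p => p.1)).map (fun x => x + 1) := by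
    simp [pairsOf, List.map_map, Function.comp_def]
  rw [h, PySem.List.map_fst_enumerate]
  exact (PySem.List.nodup_pyRange_one _ _).map (fun a b h => by omega)

lemma group_split (Q : List (Int × Int)) (t : Int)
    (hs : Q.Pairwise lexLt) (hge : ∀ p ∈ Q, t ≤ p.1) :
    ∃ G R, Q = G ++ R ∧ (∀ p ∈ G, p.1 = t) ∧ (∀ p ∈ R, t < p.1) := by
  induction Q with
  | nil => exact ⟨[], [], rfl, by simp, by simp⟩
  | cons p Q ih =>
    rcases List.pairwise_cons.1 hs with ⟨hp, hQ⟩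
    by_cases hpt : p.1 = t
    · obtain ⟨G, R, hQR, hG, hR⟩ := ih hQ (fun q hq => hge q (List.mem_cons_of_mem _ hq))
      refine ⟨p :: G, R, by simp [hQR], ?_, hR⟩
      intro q hq
      rcases List.mem_cons.1 hq with h | h
      · simp [h, hpt]
      · exact hG q h
    · refine ⟨[], p :: Q, rfl, by simp, ?_⟩
      intro q hq
      rcases List.mem_cons.1 hq with h | h
      · subst h; exact lt_of_le_of_ne (hge q (by simp)) (fun e => hpt e.symm)
      · have := hp q h
        have h2 := hge p (by simp)
        unfold lexLt at this; omega

lemma heappush_pairwise_perm (x : Int × Int) (q : List (Int × Int))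
    (hq : q.Pairwise lexLt) (hx : ∀ y ∈ q, x.2 ≠ y.2) :
    (heappushA q x).Pairwise lexLt ∧ (heappushA q x).Perm (x :: q) := by
  induction q with
  | nil => simp [heappushA, lexLt]
  | cons y ys ih =>
    rcases List.pairwise_cons.1 hq with ⟨hy, hys⟩
    rw [heappushA]
    split_ifs with hc
    · have hxy : lexLt x y := by
        have := hx y (by simp); unfold lexLt; omega
      constructor
      · exact List.pairwise_cons.2 ⟨fun z hz => by
          rcases List.mem_cons.1 hz with h | h
          · exact h ▸ hxy
          · exact lexLt_trans hxy (hy z h), hq⟩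
      · exact List.Perm.refl _
    · obtain ⟨ihs, ihp⟩ := ih hys (fun z hz => hx z (List.mem_cons_of_mem _ hz))
      have hyx : lexLt y x := by
        have := hx y (by simp); unfold lexLt; push Not at hc; omega
      constructor
      · refine List.pairwise_cons.2 ⟨fun z hz => ?_, ihs⟩
        have hz' : z ∈ x :: ys := (ihp.mem_iff).1 hz
        rcases List.mem_cons.1 hz' with h | h
        · exact h ▸ hyx
        · exact hy z h
      · exact (ihp.cons y).trans (List.Perm.swap x y ys)

lemma fold_push (xs : List (Int × Int)) : ∀ (acc : List (Int × Int)),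
    acc.Pairwise lexLt →
    (∀ x ∈ xs, ∀ y ∈ acc, x.2 ≠ y.2) →
    ((xs.map (fun p => p.2)).Nodup) →
    (xs.foldl heappushA acc).Pairwise lexLt ∧ (xs.foldl heappushA acc).Perm (acc ++ xs) := by
  induction xs with
  | nil => intro acc h _ _; simpa using h
  | cons x xs ih =>
    intro acc hacc hdisj hnd
    simp only [List.foldl_cons]
    obtain ⟨hs1, hp1⟩ := heappush_pairwise_perm x acc hacc
      (fun y hy => hdisj x (by simp) y hy)
    have hnd' : ((xs.map (fun p => p.2)).Nodup) := by
      simp only [List.map_cons, List.nodup_cons] at hnd; exact hnd.2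
    have hdisj' : ∀ z ∈ xs, ∀ y ∈ heappushA acc x, z.2 ≠ y.2 := by
      intro z hz y hy
      have hy' := (hp1.mem_iff).1 hy
      rcases List.mem_cons.1 hy' with h | h
      · intro e
        have hm : z.2 ∈ xs.map (fun p => p.2) := List.mem_map_of_mem (f := fun p => p.2) hz
        rw [e, h] at hm
        simp only [List.map_cons, List.nodup_cons] at hnd
        exact hnd.1 hm
      · exact hdisj z (List.mem_cons_of_mem _ hz) y h
    obtain ⟨hs2, hp2⟩ := ih (heappushA acc x) hs1 hdisj' hnd'
    exact ⟨hs2, hp2.trans ((hp1.append_right xs).trans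
      (by simpa using (List.perm_middle (a := x) (l₁ := acc) (l₂ := xs)).symm))⟩

lemma build_eq (fts : List Int) :
    (PySem.List.pyRange 0 (fts.length : Int) 1).foldl
        (fun q i => heappushA q (PySem.List.pyGetD fts i 0, i + 1)) [] =
      (pairsOf fts).foldl heappushA [] := by
  rw [pairsOf, PySem.List.enumerate_eq_map_pyRange (d := 0), List.map_map, List.foldl_map]
  simp [PySem.List.len_eq]

lemma skip_ties (k t : Int) (G : List (Int × Int)) : ∀ (R : List (Int × Int)) (len s : Int),
    (∀ p ∈ G, p.1 = t) → s ≤ k →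
    solutionLoop k (G ++ R) len t s = solutionLoop k R (len - G.length) t s := by
  induction G with
  | nil => intro R len s _ _; simp
  | cons p G ih =>
    intro R len s hG hs
    obtain ⟨a, b⟩ := p
    have ha : a = t := hG (a, b) (by simp)
    subst ha
    rw [List.cons_append, solutionLoop]
    simp only [sub_self, zero_mul, add_zero]
    rw [if_neg (by omega)]
    rw [ih R (len - 1) s (fun q hq => hG q (List.mem_cons_of_mem _ hq)) hs]
    congr 1
    simp only [List.length_cons]
    push_cast
    ring

lemma pyGet?_map' {α β : Type} (xs : List α) (f : α → β) (i : Int) :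
    PySem.List.pyGet? (xs.map f) i = (PySem.List.pyGet? xs i).map f := by
  simp only [PySem.List.pyGet?, PySem.List.pyIdx?, List.length_map]
  split <;> simp

lemma mem_sortedSet (fts : List Int) (v : Int) :
    v ∈ PySem.List.sorted (PySem.Set.ofList fts) (fun x => x) false ↔ v ∈ fts := by
  rw [PySem.List.mem_sorted]
  exact PySem.Set.mem_ofList fts v

lemma suffix_mem_iff (fts : List Int) (t : Int) (rest : List Int)
    (hsuf : (t :: rest) <:+ PySem.List.sorted (PySem.Set.ofList fts) (fun x => x) false) :
    ∀ v ∈ fts, (v ∈ t :: rest ↔ t ≤ v) := by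
  intro v hv
  obtain ⟨pre, hpre⟩ := hsuf
  have hpw := PySem.List.sorted_ofList_pairwise_lt fts
  rw [← hpre] at hpw
  rcases List.pairwise_append.1 hpw with ⟨hpre1, hD1, hcross⟩
  constructor
  · intro hmem
    rcases List.mem_cons.1 hmem with h | h
    · exact h ▸ le_refl t
    · exact le_of_lt ((List.pairwise_cons.1 hD1).1 v h)
  · intro hle
    have hvD : v ∈ pre ++ t :: rest := by
      rw [hpre]; exact (mem_sortedSet fts v).2 hv
    rcases List.mem_append.1 hvD with h | h
    · have : v < t := hcross v h t (by simp)
      omega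
    · exact h

lemma loop_agree (fts : List Int) (k : Int) (counts : PySem.Dict Int Int)
    (hc : ∀ v, counts.getD v 0 = (List.count v fts : Int)) :
    ∀ (D' : List Int), D' <:+ PySem.List.sorted (PySem.Set.ofList fts) (fun x => x) false →
    ∀ (Q' : List (Int × Int)) (prev eaten removed : Int),
    Q'.Pairwise lexLt →
    Q'.Perm ((pairsOf fts).filter (fun p => decide (p.1 ∈ D'))) →
    (fts.length : Int) - removed = (Q'.length : Int) →
    solutionAltLoop fts k (fts.length : Int) counts D' prev eaten removed =
      aFinish k (solutionLoop k Q' ((fts.length : Int) - removed) prev eaten) := by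
  intro D'
  induction D' with
  | nil =>
    intro _ Q' prev eaten removed _ hperm _
    have hQ : Q' = [] := by simpa using hperm
    subst hQ
    rw [solutionAltLoop, solutionLoop, aFinish]
    have hnil : PySem.List.sorted ([] : List (Int × Int)) (fun x => x.2) false = [] := by
      exact (PySem.List.sorted_eq_nil_iff _ _ _).2 rfl
    simp [hnil, PySem.List.pyGet?, PySem.List.pyIdx?]
  | cons t rest ih =>
    intro hsuf Q' prev eaten removed hsort hperm hlen
    have hmem_pairs : ∀ p ∈ pairsOf fts, p.1 ∈ fts := by
      intro p hp
      rw [← map_fst_pairsOf fts]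
      exact List.mem_map_of_mem (f := fun p => p.1) hp
    have hmemiff := suffix_mem_iff fts t rest hsuf
    have htfts : t ∈ fts := by
      have ht : t ∈ PySem.List.sorted (PySem.Set.ofList fts) (fun x => x) false :=
        hsuf.subset (by simp)
      exact (mem_sortedSet fts t).1 ht
    have hDpw : (t :: rest).Pairwise (· < ·) :=
      (PySem.List.sorted_ofList_pairwise_lt fts).sublist hsuf.sublist
    have hge : ∀ p ∈ Q', t ≤ p.1 := by
      intro p hp
      have hpf := hperm.subset hp
      rcases List.mem_filter.1 hpf with ⟨hp1, hp2⟩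
      exact (hmemiff p.1 (hmem_pairs p hp1)).1 (by simpa using hp2)
    obtain ⟨G, R, hGR, hGt, hRt⟩ := group_split Q' t hsort hge
    have hpQ : ∃ p ∈ Q', p.1 = t := by
      have ht' : t ∈ (pairsOf fts).map (fun p => p.1) := by
        rw [map_fst_pairsOf]; exact htfts
      rcases List.mem_map.1 ht' with ⟨p, hp, hpt⟩
      exact ⟨p, hperm.mem_iff.2 (List.mem_filter.2 ⟨hp, by simp [hpt]⟩), hpt⟩
    have hGne : G ≠ [] := by
      rcases hpQ with ⟨p, hpQ', hpt⟩
      intro hG0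
      rw [hGR, hG0, List.nil_append] at hpQ'
      have := hRt p hpQ'
      omega
    obtain ⟨g0, G1, hG0⟩ := List.exists_cons_of_ne_nil hGne
    have hg0 : g0.1 = t := hGt g0 (by rw [hG0]; simp)
    have hQlen : Q'.length = G1.length + 1 + R.length := by
      rw [hGR, hG0]; simp; omega
    by_cases hbr : eaten + (t - prev) * ((fts.length : Int) - removed) > k
    · -- break: A stops at the head of the t-group, B stops at t
      have hA : solutionLoop k Q' ((fts.length : Int) - removed) prev eaten
          = (Q', (fts.length : Int) - removed, eaten) := by
        rw [hGR, hG0]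
        obtain ⟨a, b⟩ := g0
        have ha : a = t := hg0
        subst ha
        rw [List.cons_append]
        simp only [solutionLoop]
        rw [if_pos hbr]
      set C := (pairsOf fts).filter (fun p => decide (t ≤ p.1)) with hC
      have hfilter_eq : (pairsOf fts).filter (fun p => decide (p.1 ∈ t :: rest)) = C := by
        rw [hC]
        apply List.filter_congr
        intro p hp
        simp only [decide_eq_decide]
        exact hmemiff p.1 (hmem_pairs p hp)
      have hCperm : C.Perm Q' := by
        rw [← hfilter_eq]; exact hperm.symm
      have hCpw : C.Pairwise (fun a b => a.2 < b.2) := by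
        apply List.Pairwise.filter
        rw [pairsOf]
        refine (List.pairwise_map).2 ?_
        refine (PySem.List.pairwise_lt_enumerate fts 0).imp ?_
        intro a b h
        simpa using (by omega : a.1 + 1 < b.1 + 1)
      have hsorted_eq : PySem.List.sorted Q' (fun x => x.2) false = C :=
        PySem.List.sorted_eq_of_perm_of_pairwise_lt Q' C _ hCperm hCpw
      have halive : ((PySem.List.enumerate fts).filter (fun p => decide (t ≤ p.2))).map
            (fun p => p.1 + 1) = C.map (fun x => x.2) := by
        rw [hC, pairsOf, List.filter_map, List.map_map]
        rfl
      simp only [solutionAltLoop]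
      rw [if_pos hbr, hA, halive]
      simp [aFinish, hsorted_eq, pyGet?_map']
    · -- continue: A pops the whole t-group, B advances one distinct time
      have hskip := skip_ties k t G1 R ((fts.length : Int) - removed - 1)
        (eaten + (t - prev) * ((fts.length : Int) - removed))
        (fun q hq => hGt q (by rw [hG0]; exact List.mem_cons_of_mem _ hq)) (by omega)
      have hA : solutionLoop k Q' ((fts.length : Int) - removed) prev eaten
          = solutionLoop k R ((fts.length : Int) - removed - 1 - G1.length) t
              (eaten + (t - prev) * ((fts.length : Int) - removed)) := by
        rw [hGR, hG0]
        obtain ⟨a, b⟩ := g0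
        have ha : a = t := hg0
        subst ha
        rw [List.cons_append]
        simp only [solutionLoop]
        rw [if_neg hbr]
        exact hskip
      have hcount : counts.getD t 0 = (G.length : Int) := by
        rw [hc t]
        norm_cast
        have h1 : Q'.countP (fun p => p.1 == t) = G.length := by
          rw [hGR, List.countP_append]
          have hGall : G.countP (fun p => p.1 == t) = G.length :=
            List.countP_eq_length.2 (fun p hp => by simp [hGt p hp])
          have hR0 : R.countP (fun p => p.1 == t) = 0 :=
            List.countP_eq_zero.2 (fun p hp => by
              have := hRt p hp; simp; omega)
          omega
        have h2 : Q'.countP (fun p => p.1 == t) = (pairsOf fts).countP (fun p => p.1 == t) := by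
          rw [hperm.countP_eq, List.countP_filter]
          apply List.countP_congr
          intro p hp
          by_cases h : p.1 = t <;> simp [h]
        have h3 : (pairsOf fts).countP (fun p => p.1 == t) = List.count t fts := by
          conv_rhs => rw [← map_fst_pairsOf fts]
          rw [List.count_eq_countP, List.countP_map]
          rfl
        rw [← h3, ← h2, h1]
      have hsufR : rest <:+ PySem.List.sorted (PySem.Set.ofList fts) (fun x => x) false :=
        (List.suffix_cons t rest).trans hsuf
      have hsortR : R.Pairwise lexLt := by
        have := hGR ▸ hsort
        exact (List.pairwise_append.1 this).2.1
      have hRfilter : R = Q'.filter (fun p => decide (t < p.1)) := by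
        rw [hGR, List.filter_append]
        have hGnil : G.filter (fun p => decide (t < p.1)) = [] :=
          List.filter_eq_nil_iff.2 (fun p hp => by simp [hGt p hp])
        have hRall : R.filter (fun p => decide (t < p.1)) = R :=
          List.filter_eq_self.2 (fun p hp => by simp [hRt p hp])
        rw [hGnil, hRall, List.nil_append]
      have hpermR : R.Perm ((pairsOf fts).filter (fun p => decide (p.1 ∈ rest))) := by
        rw [hRfilter]
        refine (hperm.filter _).trans ?_
        rw [List.filter_filter]
        apply List.Perm.of_eq
        apply List.filter_congr
        intro p hp
        by_cases hr : p.1 ∈ rest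
        · have hlt : t < p.1 := (List.pairwise_cons.1 hDpw).1 _ hr
          simp [hr, hlt]
        · by_cases hlt : t < p.1
          · have : p.1 ∉ t :: rest := by
              intro hm
              rcases List.mem_cons.1 hm with h | h
              · omega
              · exact hr h
            simp [hr, hlt, this]
          · simp [hr, hlt]
      have hlenR : (fts.length : Int) - (removed + counts.getD t 0) = (R.length : Int) := by
        rw [hcount, hG0]
        simp only [List.length_cons]
        rw [hQlen] at hlen
        push_cast at hlen ⊢
        omega
      have hIH := ih hsufR R t (eaten + (t - prev) * ((fts.length : Int) - removed))
        (removed + counts.getD t 0) hsortR hpermR hlenR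
      simp only [solutionAltLoop]
      rw [if_neg hbr, hIH, hA]
      congr 2
      rw [hcount, hG0]
      simp only [List.length_cons]
      push_cast
      ring

-- ===== VERDICT (by name: the statement is the Claim_ definition above) =====
theorem solution_spec : Claim_equal_solution := by
  intro fts k hdom hpre
  unfold Spec_solution
  by_cases h : fts.sum ≤ k
  · simp [solution, solution_alt, h]
  · rw [solution_eq_aFinish fts k h, build_eq]
    obtain ⟨hsort, hperm⟩ := fold_push (pairsOf fts) [] (by simp)
      (by simp) (snd_nodup_pairsOf fts)
    have hlen : ((pairsOf fts).foldl heappushA []).length = fts.length := by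
      have := hperm.length_eq
      simp [pairsOf, PySem.List.length_enumerate] at this
      simpa [pairsOf] using this
    have hmain := loop_agree fts k (PySem.Dict.counter fts)
      (fun v => PySem.Dict.getD_counter fts v)
      (PySem.List.sorted (PySem.Set.ofList fts) (fun x => x) false)
      (List.suffix_refl _)
      ((pairsOf fts).foldl heappushA []) 0 0 0
      hsort ?_ ?_
    · rw [solution_alt, if_neg h]
      simp only [PySem.Dict.foldl_insert_getD_add_one_eq_counter, PySem.Dict.keys_counter]
      rw [hmain]
      norm_num
    · have hfe : (pairsOf fts).filter
          (fun p => decide (p.1 ∈ PySem.List.sorted (PySem.Set.ofList fts) (fun x => x) false))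
          = pairsOf fts := by
        apply List.filter_eq_self.2
        intro p hp
        simp only [decide_eq_true_eq]
        refine (mem_sortedSet fts p.1).2 ?_
        rw [← map_fst_pairsOf fts]
        exact List.mem_map_of_mem (f := fun p => p.1) hp
      rw [hfe]
      simpa using hperm
    · simp [hlen]
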